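-- pv_equiv track=rewrite | github.com/JIH0LEE/Coding-Test | sunwoo/그리디/Gymsuit.py | solution
-- ===== SOURCE A (Python) =====
-- def solution(n, lost, reserve):
--     # 1. Set을 만든다
--     reserve_only = list(set(reserve) - set(lost))
--     lost_only = list(set(lost) - set(reserve))
--     reserve_only.sort();
--
--     # 2. 여분을 기준으로 앞뒤를 확인하여 체육복을 빌려준다.
--     for reserve in reserve_only:
--         front = reserve - 1
--         back = reserve + 1
--         if front in lost_only:
--             lost_only.remove(front)
--         elif back in lost_only:
--             lost_only.remove(back)
--
--     #3. 최대한 나눠준 뒤에 lost에 남아있는 학생들은 체육복이 없는 학생들이다.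
--     return n - len(lost_only)
-- ===== SOURCE B (Python) =====
-- def solution(n, lost, reserve):
--     L = sorted(set(lost) - set(reserve))
--     R = sorted(set(reserve) - set(lost))
--     i = j = 0
--     m = 0
--     while i < len(L) and j < len(R):
--         if abs(L[i] - R[j]) <= 1:
--             m += 1
--             i += 1
--             j += 1
--         elif L[i] < R[j]:
--             i += 1
--         else:
--             j += 1
--     return n - (len(L) - m)
-- ===== Notes on version B (the rewrite author's own statement) =====
-- stated objective: faster
-- what changed: Replaces A's per-reserver membership test and list.remove over the lost list with a single two-pointer merge of the two sorted difference lists that counts matches.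
import Mathlib
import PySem

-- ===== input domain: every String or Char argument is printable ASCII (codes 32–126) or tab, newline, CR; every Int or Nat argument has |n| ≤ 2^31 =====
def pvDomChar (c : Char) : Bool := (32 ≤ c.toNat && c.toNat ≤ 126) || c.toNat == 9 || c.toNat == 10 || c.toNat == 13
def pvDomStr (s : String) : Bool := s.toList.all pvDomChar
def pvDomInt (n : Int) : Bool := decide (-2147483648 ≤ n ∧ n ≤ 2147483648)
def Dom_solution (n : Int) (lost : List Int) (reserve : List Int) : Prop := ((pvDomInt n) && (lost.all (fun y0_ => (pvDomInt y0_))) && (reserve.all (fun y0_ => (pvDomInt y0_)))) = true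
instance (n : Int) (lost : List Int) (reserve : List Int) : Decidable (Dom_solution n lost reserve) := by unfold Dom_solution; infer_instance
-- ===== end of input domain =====

-- B replaces A's quadratic lend loop (membership test + list.remove per reserver) by a
-- two-pointer merge over the two sorted difference lists; return value only, no mutation observable.

-- ===== PORT A =====
-- one lending step of A's for-loop: try front = r-1, then back = r+1
def lendStep (lo : List Int) (r : Int) : List Int :=
  if (r - 1) ∈ lo then (PySem.List.remove? lo (r - 1)).getD lo
  else if (r + 1) ∈ lo then (PySem.List.remove? lo (r + 1)).getD lo
  else lo

def solution (n : Int) (lost : List Int) (reserve : List Int) : Int :=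
  let reserve_only := PySem.List.sorted (PySem.Set.diff (PySem.Set.ofList reserve) (PySem.Set.ofList lost)) (fun x => x) false
  let lost_only := PySem.Set.diff (PySem.Set.ofList lost) (PySem.Set.ofList reserve)
  n - (reserve_only.foldl lendStep lost_only).length

-- ===== PORT B =====
-- the while loop of Source B: i, j walk the sorted lists L and R, m counts matches
-- fuel = an upper bound on the remaining loop steps; it only makes the
-- recursion structural and is never exhausted when started at |L| + |R|
def tpLoop (L R : List Int) : Nat → Nat → Nat → Int → Int
  | 0, _, _, m => m
  | fuel + 1, i, j, m =>
    if h : i < L.length ∧ j < R.length then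
      if (L[i]'h.1 - R[j]'h.2).natAbs ≤ 1 then tpLoop L R fuel (i + 1) (j + 1) (m + 1)
      else if L[i]'h.1 < R[j]'h.2 then tpLoop L R fuel (i + 1) j m
      else tpLoop L R fuel i (j + 1) m
    else m

def solution_alt (n : Int) (lost : List Int) (reserve : List Int) : Int :=
  let L := PySem.List.sorted (PySem.Set.diff (PySem.Set.ofList lost) (PySem.Set.ofList reserve)) (fun x => x) false
  let R := PySem.List.sorted (PySem.Set.diff (PySem.Set.ofList reserve) (PySem.Set.ofList lost)) (fun x => x) false
  n - ((L.length : Int) - tpLoop L R (L.length + R.length) 0 0 0)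

-- ===== PRECONDITION & SPEC =====
def Spec_solution (n : Int) (lost : List Int) (reserve : List Int) (out : Int) : Prop := out = solution_alt n lost reserve
instance (n : Int) (lost : List Int) (reserve : List Int) (out : Int) : Decidable (Spec_solution n lost reserve out) := by unfold Spec_solution; infer_instance

-- ===== CLAIM (what is proved, stated in full; the proofs are below) =====
def Claim_equal_solution : Prop := ∀ (n : Int) (lost : List Int) (reserve : List Int), Dom_solution n lost reserve → Spec_solution n lost reserve (solution n lost reserve)

-- ===== LEMMAS AND PROOFS =====

-- recursive match-count on the sorted suffix lists (proof-side view of tpLoop)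
def tp : List Int → List Int → Int
  | [], _ => 0
  | _ :: _, [] => 0
  | l :: L, r :: R =>
    if (l - r).natAbs ≤ 1 then 1 + tp L R
    else if l < r then tp L (r :: R) else tp (l :: L) R
termination_by L R => L.length + R.length

theorem tpLoop_eq (L R : List Int) (fuel i j : Nat) (m : Int)
    (hf : (L.length - i) + (R.length - j) ≤ fuel) :
    tpLoop L R fuel i j m = m + tp (L.drop i) (R.drop j) := by
  induction fuel generalizing i j m with
  | zero =>
    have hi : L.length ≤ i := by omega
    rw [tpLoop, List.drop_eq_nil_of_le hi, tp]; ring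
  | succ fuel ih =>
    rw [tpLoop]
    split_ifs with h h1 h2
    · rw [ih _ _ _ (by omega), List.drop_eq_getElem_cons h.1, List.drop_eq_getElem_cons h.2,
        tp]
      simp [h1]; ring
    · rw [ih _ _ _ (by omega), List.drop_eq_getElem_cons h.1]
      conv_rhs => rw [List.drop_eq_getElem_cons h.2]
      rw [tp]; simp [h1, h2]
    · rw [ih _ _ _ (by omega), List.drop_eq_getElem_cons h.2]
      conv_rhs => rw [List.drop_eq_getElem_cons h.1]
      rw [tp]; simp [h1, h2]
    · rcases Nat.lt_or_ge i L.length with hi | hi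
      · have hj : R.length ≤ j := by omega
        rw [List.drop_eq_nil_of_le hj, List.drop_eq_getElem_cons hi, tp]; ring
      · rw [List.drop_eq_nil_of_le hi]
        cases R.drop j <;> simp [tp]

-- A's step rewritten through List.erase
theorem lendStep_erase (lo : List Int) (r : Int) :
    lendStep lo r =
      if (r - 1) ∈ lo then lo.erase (r - 1)
      else if (r + 1) ∈ lo then lo.erase (r + 1) else lo := by
  unfold lendStep
  split_ifs with h1 h2
  · rw [PySem.List.remove?_eq_some_erase lo _ h1]; rfl
  · rw [PySem.List.remove?_eq_some_erase lo _ h2]; rfl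
  · rfl

theorem lendStep_perm {lo lo' : List Int} (h : lo.Perm lo') (r : Int) :
    (lendStep lo r).Perm (lendStep lo' r) := by
  rw [lendStep_erase, lendStep_erase]
  have m1 : (r - 1) ∈ lo ↔ (r - 1) ∈ lo' := h.mem_iff
  have m2 : (r + 1) ∈ lo ↔ (r + 1) ∈ lo' := h.mem_iff
  split_ifs with a b <;> simp_all
  · exact h.erase _
  · exact h.erase _

theorem foldl_lendStep_perm {lo lo' : List Int} (h : lo.Perm lo') (R : List Int) :
    (R.foldl lendStep lo).Perm (R.foldl lendStep lo') := by
  induction R generalizing lo lo' with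
  | nil => simpa using h
  | cons r R ih => exact ih (lendStep_perm h r)

theorem foldl_lendStep_nil (R : List Int) : R.foldl lendStep [] = [] := by
  induction R with
  | nil => rfl
  | cons r R ih => simpa [lendStep] using ih

-- a student l strictly below every reserver minus one is never lent to
theorem foldl_lendStep_low (l : Int) (L R : List Int) (h : ∀ r ∈ R, l + 1 < r) :
    R.foldl lendStep (l :: L) = l :: R.foldl lendStep L := by
  induction R generalizing L with
  | nil => rfl
  | cons r R ih =>
    have hr := h r (by simp)
    have hstep : lendStep (l :: L) r = l :: lendStep L r := by
      rw [lendStep_erase, lendStep_erase]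
      have h1 : (r - 1 : Int) ≠ l := by omega
      have h2 : (r + 1 : Int) ≠ l := by omega
      simp [h1, h2, h1.symm, h2.symm]
      split_ifs <;> simp
    rw [List.foldl_cons, List.foldl_cons, hstep]
    exact ih _ (fun r' hr' => h r' (List.mem_cons_of_mem _ hr'))

-- main invariant: on sorted, disjoint difference lists, A's loop leaves |L| − tp L R students
theorem main_lemma (L R : List Int) (hL : L.Pairwise (· < ·)) (hR : R.Pairwise (· < ·))
    (hd : ∀ x ∈ L, x ∉ R) :
    ((R.foldl lendStep L).length : Int) = L.length - tp L R := by
  induction hn : L.length + R.length using Nat.strong_induction_on generalizing L R with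
  | _ n ih =>
  cases R with
  | nil => cases L <;> simp [tp]
  | cons r R' =>
    cases L with
    | nil => simp [lendStep, foldl_lendStep_nil, tp]
    | cons l L' =>
      subst hn
      rw [List.pairwise_cons] at hL hR
      have hlr : l ≠ r := fun e => hd l (by simp) (by simp [e])
      have hLlow : ∀ x ∈ L', l < x := hL.1
      by_cases hnear : (l - r).natAbs ≤ 1
      · -- l = r-1 or l = r+1 : A lends to l, both sides match head-to-head
        have hstep : lendStep (l :: L') r = L' := by
          rw [lendStep_erase]
          rcases (by omega : l = r - 1 ∨ l = r + 1) with e | e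
          · simp [← e]
          · have hnm : (r - 1 : Int) ∉ l :: L' := by
              simp only [List.mem_cons, not_or]
              exact ⟨by omega, fun hm => by have := hLlow _ hm; omega⟩
            simp [hnm, ← e]
        rw [List.foldl_cons, hstep, tp]
        have := ih (L'.length + R'.length) (by simp only [List.length_cons]; omega) L' R' hL.2 hR.2
          (fun x hx hxr => hd x (by simp [hx]) (by simp [hxr])) rfl
        simp only [hnear, if_true]
        rw [this]; simp only [List.length_cons]; push_cast; ring
      · by_cases hlt : l < r
        · -- l too small for any reserver: drops out of the matching on both sides
          have hlow : ∀ r' ∈ r :: R', l + 1 < r' := by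
            intro r' hr'
            rcases List.mem_cons.mp hr' with e | hm
            · subst e; omega
            · have := hR.1 _ hm; omega
          rw [foldl_lendStep_low l L' (r :: R') hlow, tp]
          simp only [hnear, if_false, hlt, if_true]
          have := ih (L'.length + (r :: R').length) (by simp only [List.length_cons]; omega) L' (r :: R') hL.2
            (List.pairwise_cons.mpr hR) (fun x hx => hd x (by simp [hx])) rfl
          simp only [List.length_cons]; push_cast; rw [this]; ring
        · -- r too small for any lost student: A's step is a no-op
          have hgt : r + 1 < l := by omega
          have hstep : lendStep (l :: L') r = l :: L' := by
            rw [lendStep_erase]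
            have h1 : (r - 1 : Int) ∉ l :: L' := by
              simp only [List.mem_cons, not_or]
              exact ⟨by omega, fun hm => by have := hLlow _ hm; omega⟩
            have h2 : (r + 1 : Int) ∉ l :: L' := by
              simp only [List.mem_cons, not_or]
              exact ⟨by omega, fun hm => by have := hLlow _ hm; omega⟩
            simp [h1, h2]
          rw [List.foldl_cons, hstep, tp]
          simp only [hnear, if_false, hlt, if_false]
          exact ih ((l :: L').length + R'.length) (by simp only [List.length_cons]; omega) (l :: L') R'
            (List.pairwise_cons.mpr hL) hR.2
            (fun x hx hxr => hd x hx (by simp [hxr])) rfl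

theorem pairwise_lt_of_sorted_diff (xs ys : List Int) :
    (PySem.List.sorted (PySem.Set.diff (PySem.Set.ofList xs) (PySem.Set.ofList ys)) (fun x => x) false).Pairwise (· < ·) := by
  have hnd : (PySem.Set.diff (PySem.Set.ofList xs) (PySem.Set.ofList ys)).Nodup :=
    PySem.Set.nodup_diff _ _ (PySem.Set.nodup_ofList xs)
  have hperm := PySem.List.sorted_perm (xs := PySem.Set.diff (PySem.Set.ofList xs) (PySem.Set.ofList ys)) (key := fun x => x) (rev := false)
  have hnd' := hperm.nodup_iff.mpr hnd
  have hle : (PySem.List.sorted (PySem.Set.diff (PySem.Set.ofList xs) (PySem.Set.ofList ys)) (fun x => x) false).Pairwise (· ≤ ·) := by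
    simpa using PySem.List.sorted_pairwise (xs := PySem.Set.diff (PySem.Set.ofList xs) (PySem.Set.ofList ys)) (key := fun x => x)
  exact (hle.and hnd').imp (fun h => lt_of_le_of_ne h.1 h.2)

-- ===== VERDICT (by name: the statement is the Claim_ definition above) =====
theorem solution_spec : Claim_equal_solution := by
  intro n lost reserve _
  unfold Spec_solution solution solution_alt
  simp only []
  set Ld := PySem.Set.diff (PySem.Set.ofList lost) (PySem.Set.ofList reserve) with hLd
  set Ls := PySem.List.sorted Ld (fun x => x) false with hLs
  set R := PySem.List.sorted (PySem.Set.diff (PySem.Set.ofList reserve) (PySem.Set.ofList lost)) (fun x => x) false with hR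
  have hpL : Ld.Perm Ls := (PySem.List.sorted_perm _ _ _).symm
  have hlen : (R.foldl lendStep Ld).length = (R.foldl lendStep Ls).length :=
    (foldl_lendStep_perm hpL R).length_eq
  have hLp : Ls.Pairwise (· < ·) := pairwise_lt_of_sorted_diff lost reserve
  have hRp : R.Pairwise (· < ·) := pairwise_lt_of_sorted_diff reserve lost
  have hdisj : ∀ x ∈ Ls, x ∉ R := by
    intro x hx hxR
    have h1 : x ∈ Ld := (PySem.List.mem_sorted _ _ _ _).mp hx
    have h2 := (PySem.List.mem_sorted _ _ _ _).mp hxR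
    rw [hLd, PySem.Set.mem_diff] at h1
    rw [PySem.Set.mem_diff] at h2
    exact h2.2 ((PySem.Set.mem_ofList _ _).mpr ((PySem.Set.mem_ofList _ _).mp h1.1))
  have hmain := main_lemma Ls R hLp hRp hdisj
  rw [hlen, tpLoop_eq _ _ _ _ _ _ (by omega), List.drop_zero, List.drop_zero, hmain]
  have : (Ls.length : Int) = Ld.length := by
    exact_mod_cast hpL.length_eq.symm
  omega
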